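-- pv_equiv track=rewrite | github.com/CatSheng/OOP | testing.py | editor
-- ===== SOURCE A (Python) =====
-- def editor(sentence):
--     """This function takes all the words in a sentence and divides them up into a list of words"""
--     # newSentence is an empty list
--     newSentence = []
--     # word is an empty string
--     word = ''
--     # iterating through each character in the sentence
--     for character in sentence:
--         # if the character is a space, append the word to the empty list: newSentence
--         if character == ' ':
--             newSentence.append(word)
--             word = ''
--         # If the character is not a space, add the character to the empty string: word
--         else:
--             word += character
--     return newSentence
-- ===== SOURCE B (Python) =====
-- def editor(sentence):
--     """This function takes all the words in a sentence and divides them up into a list of words"""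
--     return sentence.split(' ')[:-1]
-- ===== Notes on version B (the rewrite author's own statement) =====
-- stated objective: faster
-- what changed: Replaces the character-by-character accumulator loop with one library split on the space character followed by a slice dropping the trailing segment the loop never appends; the C-implemented str.split removes the per-character interpreted loop (constant-factor speedup).
import Mathlib
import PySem

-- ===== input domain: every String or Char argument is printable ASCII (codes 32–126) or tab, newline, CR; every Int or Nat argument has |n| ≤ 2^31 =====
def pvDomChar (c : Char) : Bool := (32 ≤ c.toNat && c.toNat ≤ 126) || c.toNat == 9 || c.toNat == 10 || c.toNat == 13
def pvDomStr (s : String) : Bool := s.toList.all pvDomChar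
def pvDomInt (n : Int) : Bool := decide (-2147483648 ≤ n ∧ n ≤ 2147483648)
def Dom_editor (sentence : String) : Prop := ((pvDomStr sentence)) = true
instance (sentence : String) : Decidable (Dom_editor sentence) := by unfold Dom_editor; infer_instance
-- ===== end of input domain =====

-- B: one library split on ' ' plus a [:-1] slice instead of A's character accumulator loop (idiomatic; return value only).


-- ===== PORT A =====
-- loop over the characters, state = (newSentence, word)
def editor (sentence : String) : List String :=
  (sentence.toList.foldl
    (fun (st : List String × String) character =>
      if character = ' ' then (st.1 ++ [st.2], "") else (st.1, st.2.push character))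
    ([], "")).1

-- ===== PORT B =====
-- sentence.split(' ')[:-1]; sep " " is nonempty so split? is always `some` (the none arm is unreachable)
def editor_alt (sentence : String) : List String :=
  match PySem.Str.split? sentence " " with
  | some parts => PySem.List.slice parts none (some (-1))
  | none => []

-- ===== PRECONDITION & SPEC =====
def Spec_editor (sentence : String) (out : List String) : Prop := out = editor_alt sentence
instance (sentence : String) (out : List String) : Decidable (Spec_editor sentence out) := by unfold Spec_editor; infer_instance

-- ===== CLAIM (what is proved, stated in full; the proofs are below) =====
def Claim_equal_editor : Prop := ∀ (sentence : String), Dom_editor sentence → Spec_editor sentence (editor sentence)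

-- ===== LEMMAS AND PROOFS =====

-- simple structural split on the space character
def splitSp : List Char → List (List Char)
  | [] => [[]]
  | c :: cs => if c = ' ' then [] :: splitSp cs else (splitSp cs).modifyHead (c :: ·)

theorem splitSp_ne_nil (l : List Char) : splitSp l ≠ [] := by
  cases l with
  | nil => simp [splitSp]
  | cons c cs =>
    simp only [splitSp]
    split_ifs
    · simp
    · intro h
      have := splitSp_ne_nil cs
      cases hs : splitSp cs <;> simp [hs] at h ⊢
      · exact this hs

theorem modifyHead_id' {a : Type} (l : List a) : l.modifyHead (fun x => x) = l := by
  cases l <;> rfl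

theorem splitOn_go_sp (fuel : Nat) (l cur : List Char) (acc : List (List Char)) (h : l.length ≤ fuel) :
    PySem.Chars.splitOn.go [' '] fuel l cur acc
      = acc.reverse ++ (splitSp l).modifyHead (cur.reverse ++ ·) := by
  induction fuel generalizing l cur acc with
  | zero =>
    have : l = [] := by cases l <;> simp_all
    subst this
    simp [PySem.Chars.splitOn.go, splitSp]
  | succ fuel ih =>
    cases l with
    | nil => simp [PySem.Chars.splitOn.go, splitSp]
    | cons c cs =>
      simp only [PySem.Chars.splitOn.go]
      by_cases hc : c = ' '
      · subst hc
        rw [if_pos (by simp [List.isPrefixOf])]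
        rw [ih _ _ _ (by simpa using Nat.le_of_succ_le_succ h)]
        simp [splitSp, modifyHead_id']
      · rw [if_neg (by simp [List.isPrefixOf]; exact fun h => hc h.symm)]
        rw [ih _ _ _ (by simpa using Nat.le_of_succ_le_succ h)]
        simp only [splitSp, if_neg hc]
        cases hs : splitSp cs with
        | nil => exact absurd hs (splitSp_ne_nil cs)
        | cons w ws => simp

theorem splitOn_sp (l : List Char) : PySem.Chars.splitOn l [' '] = splitSp l := by
  rw [PySem.Chars.splitOn, splitOn_go_sp _ _ _ _ (by omega)]
  simp [modifyHead_id']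

-- A's loop computes acc ++ the completed words of (word ++ rest)
theorem editor_fold (cs : List Char) (acc : List String) (word : String) :
    (cs.foldl
      (fun (st : List String × String) character =>
        if character = ' ' then (st.1 ++ [st.2], "") else (st.1, st.2.push character))
      (acc, word)).1
    = acc ++ (((splitSp cs).modifyHead (word.toList ++ ·)).dropLast.map String.ofList) := by
  induction cs generalizing acc word with
  | nil =>
    cases hs : splitSp ([] : List Char) <;> simp [splitSp] at hs
    simp [hs]
  | cons c cs ih =>
    simp only [List.foldl_cons]
    by_cases hc : c = ' '
    · subst hc
      rw [if_pos rfl, ih]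
      cases hs : splitSp cs with
      | nil => exact absurd hs (splitSp_ne_nil cs)
      | cons w ws =>
        simp [splitSp, hs, String.ofList]
    · rw [if_neg (by simp [hc]), ih]
      simp only [splitSp, if_neg hc]
      cases hs : splitSp cs with
      | nil => exact absurd hs (splitSp_ne_nil cs)
      | cons w ws =>
        simp [String.toList_push, List.append_assoc]

theorem editor_alt_eq (sentence : String) :
    editor_alt sentence = ((splitSp sentence.toList).map String.ofList).dropLast := by
  unfold editor_alt
  simp only [PySem.Str.split?, PySem.Chars.split?]
  rw [if_neg (by simp)]
  simp [PySem.List.slice_to_neg_one, splitOn_sp]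

-- ===== VERDICT (by name: the statement is the Claim_ definition above) =====
theorem editor_spec : Claim_equal_editor := by
  intro sentence _
  unfold Spec_editor editor
  rw [editor_fold, editor_alt_eq]
  cases hs : splitSp sentence.toList with
  | nil => exact absurd hs (splitSp_ne_nil _)
  | cons w ws => simp [List.map_dropLast]
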